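-- pv_equiv track=rewrite | github.com/Husso73/TP1607 | aco_functions.py | init_mat
-- ===== SOURCE A (Python) =====
-- def init_mat(N=10):
--     mat = []
--     for i in range(N):
--         row = []
--         for j in range(N):
--             if i != j:
--                 row.append(1)
--             else:
--                 row.append(0)
--         mat.append(row)
--     return mat
-- ===== SOURCE B (Python) =====
-- def init_mat(N=10):
--     # one template row with the 0 leading, every other row is a rotation of it
--     template = [0] + [1] * (N - 1)
--     return [template[N - i:] + template[:N - i] for i in range(N)]
-- ===== Notes on version B (the rewrite author's own statement) =====
-- stated objective: alternative
-- what changed: Builds a single template row [0,1,...,1] once and produces every row as a slice-based rotation of that template, instead of deciding each cell with a per-cell if/else in nested loops.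
import Mathlib
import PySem

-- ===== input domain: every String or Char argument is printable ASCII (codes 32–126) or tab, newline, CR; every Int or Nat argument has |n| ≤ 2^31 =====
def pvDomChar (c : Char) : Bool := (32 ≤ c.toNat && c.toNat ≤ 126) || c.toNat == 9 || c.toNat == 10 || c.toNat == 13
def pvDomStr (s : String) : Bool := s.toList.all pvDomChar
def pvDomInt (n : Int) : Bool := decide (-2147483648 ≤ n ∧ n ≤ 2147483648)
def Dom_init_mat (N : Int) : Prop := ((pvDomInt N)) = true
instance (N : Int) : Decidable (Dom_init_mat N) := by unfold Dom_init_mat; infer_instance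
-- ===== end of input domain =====

-- B builds one template row [0,1,...,1] and returns each row as a slice rotation of it (alternative algorithm, same cost).

-- ===== PORT A =====
def init_mat (N : Int) : List (List Int) :=
  (PySem.List.pyRange 0 N 1).foldl
    (fun mat i =>
      mat ++ [(PySem.List.pyRange 0 N 1).foldl
        (fun row j => if i ≠ j then row ++ [(1 : Int)] else row ++ [(0 : Int)]) []])
    []

-- ===== PORT B =====
def init_mat_alt (N : Int) : List (List Int) :=
  let template := [(0 : Int)] ++ List.replicate (N - 1).toNat (1 : Int)
  (PySem.List.pyRange 0 N 1).map
    (fun i => PySem.List.slice template (some (N - i)) none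
              ++ PySem.List.slice template none (some (N - i)))

-- ===== PRECONDITION & SPEC =====
def Spec_init_mat (N : Int) (out : List (List Int)) : Prop := out = init_mat_alt N
instance (N : Int) (out : List (List Int)) : Decidable (Spec_init_mat N out) := by unfold Spec_init_mat; infer_instance

-- ===== CLAIM =====
def Claim_equal_init_mat : Prop := ∀ (N : Int), Dom_init_mat N → Spec_init_mat N (init_mat N)

-- ===== LEMMAS AND PROOFS =====

-- the rotation of the template equals A's if/else row
lemma rot_eq (n k : ℕ) (hk : k < n) :
    ((0 : Int) :: List.replicate (n - 1) (1 : Int)).drop (n - k)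
      ++ ((0 : Int) :: List.replicate (n - 1) (1 : Int)).take (n - k)
    = (List.range n).map (fun j : ℕ => if (k : Int) ≠ (j : Int) then (1 : Int) else 0) := by
  obtain ⟨m, rfl⟩ : ∃ m, n = m + 1 := ⟨n - 1, by omega⟩
  have hkm : k ≤ m := by omega
  have hd : ((0 : Int) :: List.replicate (m + 1 - 1) (1 : Int)).drop (m + 1 - k)
      = List.replicate k (1 : Int) := by
    have : m + 1 - k = (m - k) + 1 := by omega
    rw [this]
    simp only [Nat.add_sub_cancel, List.drop_succ_cons, List.drop_replicate]
    congr 1; omega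
  have ht : ((0 : Int) :: List.replicate (m + 1 - 1) (1 : Int)).take (m + 1 - k)
      = (0 : Int) :: List.replicate (m - k) (1 : Int) := by
    have : m + 1 - k = (m - k) + 1 := by omega
    rw [this]
    simp only [Nat.add_sub_cancel, List.take_succ_cons, List.take_replicate]
    congr 2; omega
  rw [hd, ht]
  apply List.ext_getElem
  · simp; omega
  · intro j h1 h2
    simp only [List.getElem_map, List.getElem_range]
    by_cases hj : j < k
    · rw [List.getElem_append_left (by simpa using hj)]
      have : (k : Int) ≠ (j : Int) := by
        intro h; exact absurd (by exact_mod_cast h) (by omega)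
      simp [this]
    · rw [List.getElem_append_right (by simpa using hj)]
      by_cases hjk : j = k
      · subst hjk; simp
      · have hne : (k : Int) ≠ (j : Int) := by
          intro h; exact absurd (by exact_mod_cast h.symm : j = k) hjk
        simp only [List.getElem_cons, List.length_replicate]
        have hjz : ¬ (j - k = 0) := by omega
        simp [hjz, hne]

-- ===== VERDICT =====
theorem init_mat_spec : Claim_equal_init_mat := by
  intro N _
  unfold Spec_init_mat init_mat init_mat_alt
  have hr : PySem.List.pyRange 0 N 1 = (List.range N.toNat).map (fun k : ℕ => (k : Int)) := by
    rw [PySem.List.pyRange_one]; simp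
  rw [hr]
  set n := N.toNat with hn
  simp only [List.foldl_map, List.map_map, Function.comp_def]
  rw [PySem.List.foldl_append_singleton_eq_map
      (f := fun i : ℕ => (List.range n).foldl
        (fun row (j : ℕ) => if ((i : Int) ≠ (j : Int)) then row ++ [(1:Int)] else row ++ [0]) [])]
  simp only [List.nil_append]
  apply List.map_congr_left
  intro i hi
  have hin : i < n := List.mem_range.mp hi
  have hnpos : 1 ≤ N := by omega
  -- A's row i as a map
  have key : ∀ (m : ℕ) (acc : List Int),
      (List.range m).foldl
        (fun row (j : ℕ) => if ((i : Int) ≠ (j : Int)) then row ++ [(1:Int)] else row ++ [0]) acc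
      = acc ++ (List.range m).map (fun j : ℕ => if ((i : Int) ≠ (j : Int)) then (1:Int) else 0) := by
    intro m
    induction m with
    | zero => simp
    | succ kk ihk =>
      intro acc
      rw [List.range_succ, List.foldl_append, List.map_append, ihk]
      simp only [List.foldl_cons, List.foldl_nil, List.map_cons, List.map_nil]
      split_ifs <;> simp
  rw [key]
  -- B's row i via slice lemmas
  have hNi : (0 : Int) ≤ N - (i : Int) := by omega
  rw [PySem.List.slice_from _ hNi, PySem.List.slice_to _ hNi]
  have htm : (N - 1).toNat = n - 1 := by omega
  have hNit : (N - (i : Int)).toNat = n - i := by omega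
  rw [htm, hNit]
  simp only [List.nil_append, List.singleton_append]
  exact (rot_eq n i hin).symm
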